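-- pv_equiv track=rewrite | github.com/javim7/Cifrado-Informacion | funciones/asciiToXOR.py | xOrToAscii
-- ===== SOURCE A (Python) =====
-- def getAsciiFromLetter(letter):
--     return ord(letter)
--
-- def getBinaryFromNumber(ascii):
--     binaryNumber = ''
--     while ascii > 0:
--         binaryNumber = str(ascii % 2) + binaryNumber
--         ascii = ascii // 2
--     while len(binaryNumber) < 8:
--         binaryNumber = '0' + binaryNumber
--     return binaryNumber
--
-- def xOr(binary_word, binary_key):
--     xOr_rep = ''
--     for i in range(len(binary_word)):
--         xOr_rep += str(int(binary_word[i]) ^ int(binary_key[i]))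
--     return xOr_rep
--
-- def xOrToAscii(xOr_rep, key):
--     key = checkBitLenght(xOr_rep, key)
--     binary_key = ''
--     for letter in key:
--         ascii_val = getAsciiFromLetter(letter)
--         binary = getBinaryFromNumber(ascii_val)
--         binary_key += binary
--     xOrRevert = xOr(xOr_rep, binary_key)
--     asciiRepresentation = binaryToAscii(xOrRevert)
--     return asciiRepresentation
--
-- def checkBitLenght(xOr_rep, key):
--     charLength = len(xOr_rep) // 8
--
--     if len(key) < charLength:
--         key = key * (charLength // len(key)) + key[:charLength % len(key)]
--
--     return key
--
-- def binaryToAscii(binary_string):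
--     # Convertir de binario a ASCII
--     ascii_string = ''.join(chr(int(binary_string[i:i+8], 2)) for i in range(0, len(binary_string), 8))
--     # Eliminar caracteres ficticios
--     ascii_string = ascii_string.rstrip('\0')
--     return ascii_string
-- ===== SOURCE B (Python) =====
-- def checkBitLenght(xOr_rep, key):
--     charLength = len(xOr_rep) // 8
--     if len(key) < charLength:
--         key = key * (charLength // len(key)) + key[:charLength % len(key)]
--     return key
--
-- def xOrToAscii(xOr_rep, key):
--     # byte-wise: decode each 8-bit chunk to an int and XOR it with the key byte,
--     # instead of building a long binary key string and XORing bit by bit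
--     key = checkBitLenght(xOr_rep, key)
--     chars = []
--     for i in range(0, len(xOr_rep), 8):
--         chunk = xOr_rep[i:i+8]
--         kb = ord(key[i // 8]) >> (8 - len(chunk))
--         chars.append(chr(int(chunk, 2) ^ kb))
--     return ''.join(chars).rstrip('\0')
-- ===== Notes on version B (the rewrite author's own statement) =====
-- stated objective: simpler
-- what changed: Instead of expanding the key into an 8*n-character binary string, XORing the ciphertext bit-character by bit-character and re-parsing 8-bit substrings, B makes one byte-wise pass: each 8-bit chunk is parsed to an int once and XORed against the key byte (shifted for a partial final chunk).
import Mathlib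
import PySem

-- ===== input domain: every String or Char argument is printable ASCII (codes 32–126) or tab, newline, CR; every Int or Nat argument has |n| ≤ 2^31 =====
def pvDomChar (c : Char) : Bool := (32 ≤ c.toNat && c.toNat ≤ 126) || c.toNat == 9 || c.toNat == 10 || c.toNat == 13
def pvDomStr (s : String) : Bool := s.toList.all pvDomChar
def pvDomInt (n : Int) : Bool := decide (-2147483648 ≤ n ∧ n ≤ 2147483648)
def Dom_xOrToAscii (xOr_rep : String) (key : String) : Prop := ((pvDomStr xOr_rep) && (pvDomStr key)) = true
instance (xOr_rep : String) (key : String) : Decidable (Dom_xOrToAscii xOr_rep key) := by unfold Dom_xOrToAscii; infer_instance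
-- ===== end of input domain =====

-- B replaces A's bit-string pipeline (build an 8·n-character binary key string, XOR it character by character, re-parse 8-bit
-- substrings) by one byte-wise pass: each 8-bit chunk is parsed once and XORed as an integer against the key byte (simpler; same cost class).

-- ===== PORT A =====
def getAsciiFromLetter (letter : Char) : Int := (letter.toNat : Int)

-- while ascii > 0: binaryNumber = str(ascii % 2) + binaryNumber; ascii = ascii // 2
def gbnLoop (ascii : Int) (binaryNumber : List Char) : List Char :=
  if h : 0 < ascii then
    gbnLoop (PySem.Int.floordiv ascii 2) (PySem.Int.toChars (PySem.Int.mod ascii 2) ++ binaryNumber)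
  else binaryNumber
termination_by ascii.toNat
decreasing_by
  simp only [PySem.Int.floordiv, Int.fdiv_eq_ediv]
  omega

-- while len(binaryNumber) < 8: binaryNumber = '0' + binaryNumber
def padLoop (binaryNumber : List Char) : List Char :=
  if binaryNumber.length < 8 then padLoop ('0' :: binaryNumber) else binaryNumber
termination_by 8 - binaryNumber.length

def getBinaryFromNumber (ascii : Int) : List Char := padLoop (gbnLoop ascii [])

-- int(s) for a single-character string s; the .getD 0 is unreachable inside Pre_ (non-digit = ValueError)
def pyInt1 (c : Char) : Int := (PySem.Int.ofChars? [c]).getD 0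

-- xOr: for i in range(len(binary_word)): xOr_rep += str(int(binary_word[i]) ^ int(binary_key[i]))
-- (the ' ' defaults are unreachable inside Pre_: an out-of-range index is an IndexError)
def xOrL (binary_word : List Char) (binary_key : List Char) : List Char :=
  (PySem.List.pyRange 0 binary_word.length 1).foldl
    (fun acc i => acc ++ PySem.Int.toChars
       (PySem.Int.bxor (pyInt1 (PySem.List.pyGetD binary_word i ' ')) (pyInt1 (PySem.List.pyGetD binary_key i ' ')))) []

-- int(s, 2): exact for strings of binary digits '0'/'1'; any other character is a ValueError in Python (excluded by Pre_)
def parseBin2 (l : List Char) : Int := l.foldl (fun a c => 2 * a + ((c.toNat : Int) - 48)) 0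

-- s.rstrip('\0'): drop trailing NUL characters (exact, ported by hand: PySem's rstrip strips whitespace only)
def rstripNul (l : List Char) : List Char := (l.reverse.dropWhile (· = Char.ofNat 0)).reverse

-- ''.join(chr(int(binary_string[i:i+8], 2)) for i in range(0, len(binary_string), 8)) then rstrip('\0')
def binaryToAscii (binary_string : List Char) : List Char :=
  rstripNul ((PySem.List.pyRange 0 binary_string.length 8).map
    (fun i => Char.ofNat (parseBin2 (PySem.List.slice binary_string (some i) (some (i + 8)))).toNat))

-- len//8 and charLength//len(key), charLength%len(key) are Python floor division/mod on nonnegative ints = Nat / and %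
-- (exact; key = '' in the taken branch is a ZeroDivisionError in Python, excluded by Pre_)
def checkBitLenght (xOr_rep : List Char) (key : List Char) : List Char :=
  let charLength := xOr_rep.length / 8
  if key.length < charLength then
    (List.replicate (charLength / key.length) key).flatten ++ key.take (charLength % key.length)
  else key

def xOrToAscii (xOr_rep : String) (key : String) : String :=
  let keyL := checkBitLenght xOr_rep.toList key.toList
  let binary_key := keyL.foldl (fun acc letter => acc ++ getBinaryFromNumber (getAsciiFromLetter letter)) []
  let xOrRevert := xOrL xOr_rep.toList binary_key
  String.mk (binaryToAscii xOrRevert)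

-- ===== PORT B =====
-- for i in range(0, len(xOr_rep), 8): chunk = xOr_rep[i:i+8]; kb = ord(key[i//8]) >> (8-len(chunk)); chr(int(chunk,2) ^ kb)
-- ported as structural recursion consuming 8 chars of xs and one key char per step (key[i//8] = successive heads);
-- the headD default is unreachable inside Pre_ (a too-short key is an IndexError)
def altLoop (xs : List Char) (ks : List Char) : List Char :=
  if h : xs = [] then []
  else
    let chunk := xs.take 8
    let kb := (ks.headD (Char.ofNat 0)).toNat >>> (8 - chunk.length)
    Char.ofNat ((parseBin2 chunk).toNat ^^^ kb) :: altLoop (xs.drop 8) ks.tail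
termination_by xs.length
decreasing_by
  have : xs.length ≠ 0 := fun h0 => h (List.eq_nil_of_length_eq_zero h0)
  simp only [List.length_drop]; omega

def xOrToAscii_alt (xOr_rep : String) (key : String) : String :=
  let keyL := checkBitLenght xOr_rep.toList key.toList
  String.mk (rstripNul (altLoop xOr_rep.toList keyL))

-- ===== PRECONDITION & SPEC =====
-- Pre_ excludes exactly the inputs on which Python A raises: a non-binary character in xOr_rep (ValueError from int),
-- and a key whose cyclic extension yields fewer key bits than len(xOr_rep) (IndexError in xOr, or ZeroDivisionError for key = '').
def Pre_xOrToAscii (xOr_rep : String) (key : String) : Prop :=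
  (xOr_rep.toList.all (fun c => c == '0' || c == '1')
    && (Nat.ble xOr_rep.toList.length (8 * key.toList.length)
        || (!key.toList.isEmpty && Nat.beq (xOr_rep.toList.length % 8) 0))) = true
instance (xOr_rep : String) (key : String) : Decidable (Pre_xOrToAscii xOr_rep key) := by
  unfold Pre_xOrToAscii; infer_instance

def pvWitness_xOrToAscii : String × String := ("0110100001101001", "ab")

def Spec_xOrToAscii (xOr_rep : String) (key : String) (out : String) : Prop := out = xOrToAscii_alt xOr_rep key
instance (xOr_rep : String) (key : String) (out : String) : Decidable (Spec_xOrToAscii xOr_rep key out) := by unfold Spec_xOrToAscii; infer_instance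

-- ===== CLAIM (what is proved, stated in full; the proofs are below) =====
def Claim_equal_xOrToAscii : Prop := ∀ (xOr_rep : String) (key : String), Dom_xOrToAscii xOr_rep key → Pre_xOrToAscii xOr_rep key → Spec_xOrToAscii xOr_rep key (xOrToAscii xOr_rep key)

-- ===== LEMMAS AND PROOFS =====

-- value of a big-endian bit string
def bitv (l : List Char) : Nat := l.foldl (fun a c => 2 * a + (if c = '1' then 1 else 0)) 0

def isBits (l : List Char) : Prop := ∀ c ∈ l, c = '0' ∨ c = '1'

-- minimal big-endian binary representation (the value of A's first while loop)
def bitsOf (n : Nat) : List Char :=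
  if n = 0 then [] else bitsOf (n / 2) ++ [if n % 2 = 1 then '1' else '0']

-- chunk-recursion form of A's binaryToAscii generator
def chunksA (bs : List Char) : List Char :=
  if h : bs = [] then []
  else Char.ofNat (parseBin2 (bs.take 8)).toNat :: chunksA (bs.drop 8)
termination_by bs.length
decreasing_by
  have : bs.length ≠ 0 := fun h0 => h (List.eq_nil_of_length_eq_zero h0)
  simp only [List.length_drop]; omega

-- XOR of two bits as characters
def xchar (a b : Char) : Char := if (a = '1') = (b = '1') then '0' else '1'

theorem bitv_foldl_from (b : List Char) (m : Nat) :
    b.foldl (fun a c => 2 * a + (if c = '1' then 1 else 0)) m = m * 2 ^ b.length + bitv b := by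
  induction b generalizing m with
  | nil => simp [bitv]
  | cons c b ih =>
    simp only [List.foldl_cons, List.length_cons, bitv] at *
    rw [ih, ih (2 * 0 + (if c = '1' then 1 else 0))]
    ring

theorem bitv_cons (c : Char) (l : List Char) :
    bitv (c :: l) = (if c = '1' then 1 else 0) * 2 ^ l.length + bitv l := by
  conv_lhs => simp only [bitv, List.foldl_cons]
  rw [bitv_foldl_from]
  simp [bitv]

theorem bitv_lt (l : List Char) : bitv l < 2 ^ l.length := by
  induction l with
  | nil => simp [bitv]
  | cons c l ih =>
    rw [bitv_cons]
    simp only [List.length_cons, pow_succ]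
    split <;> omega

theorem parseBin2_eq_bitv (l : List Char) (h : isBits l) : parseBin2 l = (bitv l : Int) := by
  have gen : ∀ (l : List Char), isBits l → ∀ (m : Nat),
      l.foldl (fun a c => 2 * a + ((c.toNat : Int) - 48)) (m : Int) =
        ((l.foldl (fun a c => 2 * a + (if c = '1' then 1 else 0)) m : Nat) : Int) := by
    intro l hl
    induction l with
    | nil => intro m; simp
    | cons c t ih =>
      intro m
      have hc : c = '0' ∨ c = '1' := hl c (by simp)
      have ht : isBits t := fun d hd => hl d (by simp [hd])
      have : ((c.toNat : Int) - 48) = ((if c = '1' then 1 else 0 : Nat) : Int) := by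
        rcases hc with h | h <;> subst h <;> decide
      simp only [List.foldl_cons, this]
      have hcast : 2 * (m : Int) + (((if c = '1' then 1 else 0) : Nat) : Int) =
          (((2 * m + (if c = '1' then 1 else 0)) : Nat) : Int) := by push_cast; ring
      rw [hcast, ih ht]
  have := gen l h 0
  simpa [parseBin2, bitv] using this

theorem gbnLoop_eq (n : Nat) (acc : List Char) : gbnLoop (n : Int) acc = bitsOf n ++ acc := by
  induction n using Nat.strong_induction_on generalizing acc with
  | _ n ih =>
    rw [gbnLoop, bitsOf]
    by_cases h0 : n = 0
    · subst h0; simp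
    · have hpos : 0 < (n : Int) := by omega
      rw [dif_pos hpos]
      have hdiv : PySem.Int.floordiv (n : Int) 2 = ((n / 2 : Nat) : Int) := by
        simp [PySem.Int.floordiv, Int.fdiv_eq_ediv]
      have hmod : PySem.Int.mod (n : Int) 2 = ((n % 2 : Nat) : Int) := by
        simp [PySem.Int.mod, Int.fmod_eq_emod]
      rw [hdiv, hmod, ih (n / 2) (by omega)]
      have hbit : PySem.Int.toChars ((n % 2 : Nat) : Int) = [if n % 2 = 1 then '1' else '0'] := by
        rcases Nat.mod_two_eq_zero_or_one n with h | h <;> rw [h] <;> decide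
      rw [hbit]
      simp [h0]

theorem padLoop_eq (l : List Char) : padLoop l = List.replicate (8 - l.length) '0' ++ l := by
  by_cases h : l.length < 8
  · have : padLoop l = padLoop ('0' :: l) := by rw [padLoop, if_pos h]
    rw [this, padLoop_eq ('0' :: l)]
    have h1 : 8 - l.length = (8 - ('0' :: l).length) + 1 := by simp; omega
    rw [h1, List.replicate_succ']
    simp
  · rw [padLoop, if_neg h]
    have : 8 - l.length = 0 := by omega
    simp [this]
termination_by 8 - l.length
decreasing_by simp; omega

theorem bitsOf_isBits (n : Nat) : isBits (bitsOf n) := by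
  induction n using Nat.strong_induction_on with
  | _ n ih =>
    rw [bitsOf]
    by_cases h0 : n = 0
    · simp [h0, isBits]
    · rw [if_neg h0]
      intro c hc
      rcases List.mem_append.mp hc with h | h
      · exact ih (n / 2) (by omega) c h
      · simp at h; subst h; split <;> simp

theorem bitv_append_single (a : List Char) (c : Char) :
    bitv (a ++ [c]) = 2 * bitv a + (if c = '1' then 1 else 0) := by
  simp only [bitv, List.foldl_append, List.foldl_cons, List.foldl_nil]

theorem bitv_bitsOf (n : Nat) : bitv (bitsOf n) = n := by
  induction n using Nat.strong_induction_on with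
  | _ n ih =>
    rw [bitsOf]
    by_cases h0 : n = 0
    · simp [h0, bitv]
    · rw [if_neg h0, bitv_append_single, ih (n / 2) (by omega)]
      rcases Nat.mod_two_eq_zero_or_one n with h | h <;> simp [h] <;> omega

theorem bitsOf_length_le (n k : Nat) (h : n < 2 ^ k) : (bitsOf n).length ≤ k := by
  induction n using Nat.strong_induction_on generalizing k with
  | _ n ih =>
    rw [bitsOf]
    by_cases h0 : n = 0
    · simp [h0]
    · rw [if_neg h0]
      have hk : k ≠ 0 := by rintro rfl; simp at h; omega
      obtain ⟨k', rfl⟩ : ∃ k', k = k' + 1 := ⟨k - 1, by omega⟩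
      have : n / 2 < 2 ^ k' := by
        rw [pow_succ] at h; omega
      have := ih (n / 2) (by omega) k' this
      simp; omega

theorem bitv_replicate_zero_append (k : Nat) (l : List Char) :
    bitv (List.replicate k '0' ++ l) = bitv l := by
  induction k with
  | zero => simp
  | succ k ih =>
    rw [List.replicate_succ, List.cons_append, bitv_cons]
    simpa using ih

theorem bin8_spec (c : Char) (h : c.toNat < 256) :
    (getBinaryFromNumber (getAsciiFromLetter c)).length = 8 ∧
    isBits (getBinaryFromNumber (getAsciiFromLetter c)) ∧
    bitv (getBinaryFromNumber (getAsciiFromLetter c)) = c.toNat := by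
  have hlen : (bitsOf c.toNat).length ≤ 8 := bitsOf_length_le _ 8 (by norm_num; omega)
  have e : getBinaryFromNumber (getAsciiFromLetter c) =
      List.replicate (8 - (bitsOf c.toNat).length) '0' ++ bitsOf c.toNat := by
    simp only [getBinaryFromNumber, getAsciiFromLetter]
    rw [gbnLoop_eq, List.append_nil, padLoop_eq]
  refine ⟨?_, ?_, ?_⟩
  · rw [e]; simp; omega
  · rw [e]; intro d hd
    rcases List.mem_append.mp hd with h1 | h1
    · left; exact (List.eq_of_mem_replicate h1)
    · exact bitsOf_isBits _ d h1
  · rw [e, bitv_replicate_zero_append, bitv_bitsOf]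

theorem bitv_append (a b : List Char) : bitv (a ++ b) = bitv a * 2 ^ b.length + bitv b := by
  conv_lhs => simp only [bitv, List.foldl_append]
  rw [bitv_foldl_from]
  simp [bitv]

theorem bitv_take (bs : List Char) (r : Nat) (hb : isBits bs) (hr : r ≤ bs.length) :
    bitv (bs.take r) = bitv bs >>> (bs.length - r) := by
  have hsplit : bs = bs.take r ++ bs.drop r := (List.take_append_drop r bs).symm
  have hlen : (bs.drop r).length = bs.length - r := by simp
  have hdl : bitv (bs.drop r) < 2 ^ (bs.length - r) := hlen ▸ bitv_lt _
  have hb2 : bitv bs = bitv (bs.take r) * 2 ^ (bs.length - r) + bitv (bs.drop r) := by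
    conv_lhs => rw [hsplit]
    rw [bitv_append, hlen]
  rw [Nat.shiftRight_eq_div_pow, hb2, mul_comm, Nat.mul_add_div (by positivity), Nat.div_eq_of_lt hdl]
  simp

theorem xor_high (n x y a b : Nat) (ha : a < 2 ^ n) (hb : b < 2 ^ n) :
    (x * 2 ^ n + a) ^^^ (y * 2 ^ n + b) = (x ^^^ y) * 2 ^ n + (a ^^^ b) := by
  apply Nat.eq_of_testBit_eq
  intro i
  have hab : a ^^^ b < 2 ^ n := Nat.xor_lt_two_pow ha hb
  rw [Nat.testBit_xor, mul_comm x, mul_comm y, mul_comm (x ^^^ y),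
      Nat.testBit_two_pow_mul_add x ha, Nat.testBit_two_pow_mul_add y hb,
      Nat.testBit_two_pow_mul_add (x ^^^ y) hab]
  split
  · rw [Nat.testBit_xor]
  · rw [Nat.testBit_xor]

theorem xchar_bit (a b : Char) : xchar a b = '0' ∨ xchar a b = '1' := by
  unfold xchar; split <;> simp

theorem isBits_zipWith_xchar (a b : List Char) : isBits (List.zipWith xchar a b) := by
  induction a generalizing b with
  | nil => simp [isBits]
  | cons x a' ih =>
    cases b with
    | nil => simp [isBits]
    | cons y b' =>
      intro c hc
      rw [List.zipWith_cons_cons] at hc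
      rcases List.mem_cons.mp hc with h | h
      · subst h; exact xchar_bit x y
      · exact ih b' c h

theorem bitv_zipWith_xchar (a b : List Char) (ha : isBits a) (hb : isBits b)
    (hlen : a.length = b.length) :
    bitv (List.zipWith xchar a b) = bitv a ^^^ bitv b := by
  induction a generalizing b with
  | nil =>
    have : b = [] := List.eq_nil_of_length_eq_zero hlen.symm
    simp [this, bitv]
  | cons x a' ih =>
    cases b with
    | nil => simp at hlen
    | cons y b' =>
      have hl' : a'.length = b'.length := by simpa using hlen
      have ha' : isBits a' := fun d hd => ha d (by simp [hd])
      have hb' : isBits b' := fun d hd => hb d (by simp [hd])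
      rw [List.zipWith_cons_cons, bitv_cons, bitv_cons, bitv_cons, ih b' ha' hb' hl']
      have hzl : (List.zipWith xchar a' b').length = a'.length := by simp [hl']
      have hbitx : (if xchar x y = '1' then 1 else 0) =
          ((if x = '1' then 1 else 0) ^^^ (if y = '1' then 1 else 0) : Nat) := by
        by_cases hx : x = '1' <;> by_cases hy : y = '1' <;> simp [xchar, hx, hy]
      rw [hzl, hbitx, hl']
      rw [xor_high b'.length _ _ _ _ (hl' ▸ bitv_lt a') (bitv_lt b')]

theorem xOrL_eq_zipWith (x bk : List Char) (hx : isBits x) (hb : isBits bk)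
    (hlen : x.length ≤ bk.length) : xOrL x bk = List.zipWith xchar x bk := by
  unfold xOrL
  rw [PySem.List.foldl_append_eq_flatMap, PySem.List.pyRange_one, List.flatMap_map]
  simp only [List.nil_append, zero_add, Int.sub_zero, Int.toNat_natCast]
  have step : ∀ k ∈ List.range x.length,
      PySem.Int.toChars (PySem.Int.bxor (pyInt1 (PySem.List.pyGetD x (k : Nat) ' '))
        (pyInt1 (PySem.List.pyGetD bk (k : Nat) ' '))) = [xchar (x.getD k ' ') (bk.getD k ' ')] := by
    intro k hk
    have hk1 : k < x.length := List.mem_range.mp hk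
    have hk2 : k < bk.length := lt_of_lt_of_le hk1 hlen
    rw [PySem.List.pyGetD_natCast, PySem.List.pyGetD_natCast]
    have hcx : x.getD k ' ' = '0' ∨ x.getD k ' ' = '1' := by
      rw [List.getD_eq_getElem _ _ hk1]; exact hx _ (List.getElem_mem hk1)
    have hcb : bk.getD k ' ' = '0' ∨ bk.getD k ' ' = '1' := by
      rw [List.getD_eq_getElem _ _ hk2]; exact hb _ (List.getElem_mem hk2)
    rcases hcx with h1 | h1 <;> rcases hcb with h2 | h2 <;> rw [h1, h2] <;> decide
  rw [List.flatMap_congr step]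
  · have fm : ∀ {α β : Type} (f : α → β) (l : List α),
        l.flatMap (fun a => [f a]) = l.map f := by
      intro α β f l
      induction l with
      | nil => rfl
      | cons a t ih => simp [ih]
    rw [fm]
    apply List.ext_getElem
    · simp [hlen]
    · intro i h1 h2
      simp only [List.getElem_map, List.getElem_range, List.getElem_zipWith]
      have hi1 : i < x.length := by simpa using h1
      have hi2 : i < bk.length := lt_of_lt_of_le hi1 hlen
      rw [List.getD_eq_getElem _ _ hi1, List.getD_eq_getElem _ _ hi2]

theorem chunkC (m : Nat) : ∀ bs : List Char, (bs.length + 7) / 8 = m →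
    (List.range m).map (fun k => Char.ofNat (parseBin2 ((bs.drop (8 * k)).take 8)).toNat) =
      chunksA bs := by
  induction m with
  | zero =>
    intro bs hm
    have : bs = [] := List.eq_nil_of_length_eq_zero (by omega)
    subst this
    simp [chunksA]
  | succ m ih =>
    intro bs hm
    have hne : bs ≠ [] := by
      intro h; subst h; simp at hm
    rw [List.range_succ_eq_map, List.map_cons, List.map_map]
    rw [chunksA, dif_neg hne]
    refine List.cons_eq_cons.mpr ⟨?_, ?_⟩
    · show Char.ofNat (parseBin2 ((bs.drop (8 * 0)).take 8)).toNat = _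
      norm_num
    · have hlen : bs.length ≠ 0 := fun h => hne (List.eq_nil_of_length_eq_zero h)
      have hm' : ((bs.drop 8).length + 7) / 8 = m := by rw [List.length_drop]; omega
      rw [← ih (bs.drop 8) hm']
      apply List.map_congr_left
      intro k _
      simp only [Function.comp_apply, Nat.succ_eq_add_one]
      rw [List.drop_drop, show 8 + 8 * k = 8 * (k + 1) by ring]

theorem binaryToAscii_eq_chunksA (bs : List Char) :
    binaryToAscii bs = rstripNul (chunksA bs) := by
  unfold binaryToAscii
  congr 1
  rw [PySem.List.pyRange_of_pos 0 (bs.length : Int) (by norm_num), List.map_map]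
  have hcount : (if (0 : Int) < (bs.length : Int) then (((bs.length : Int) - 0 + 8 - 1) / 8).toNat else 0) =
      (bs.length + 7) / 8 := by
    split <;> omega
  rw [hcount, ← chunkC ((bs.length + 7) / 8) bs rfl]
  apply List.map_congr_left
  intro k _
  simp only [Function.comp_apply, zero_add]
  congr 2
  rw [show ((8 : Int) * (k : Nat)) = ((8 * k : Nat) : Int) by push_cast; ring]
  rw [show ((8 * k : Nat) : Int) + 8 = ((8 * k : Nat) : Int) + ((8 : Nat) : Int) by norm_num]
  rw [PySem.List.slice_natCast_add]

theorem zipWith_split (f : Char → Char → Char) (x a b : List Char) :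
    List.zipWith f x (a ++ b) =
      List.zipWith f (x.take a.length) a ++ List.zipWith f (x.drop a.length) b := by
  induction a generalizing x with
  | nil => simp
  | cons c a' ih =>
    cases x with
    | nil => simp
    | cons x0 x' => simp [ih]

theorem altLoop_nil (ks : List Char) : altLoop [] ks = [] := by
  rw [altLoop]; simp

theorem altLoop_cons (xs ks : List Char) (h : xs ≠ []) :
    altLoop xs ks =
      Char.ofNat ((parseBin2 (xs.take 8)).toNat ^^^
          ((ks.headD (Char.ofNat 0)).toNat >>> (8 - (xs.take 8).length))) ::
        altLoop (xs.drop 8) ks.tail := by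
  rw [altLoop]; rw [dif_neg h]

theorem chunksA_nil : chunksA [] = [] := by
  rw [chunksA]; simp

theorem chunksA_cons (bs : List Char) (h : bs ≠ []) :
    chunksA bs = Char.ofNat (parseBin2 (bs.take 8)).toNat :: chunksA (bs.drop 8) := by
  rw [chunksA]; rw [dif_neg h]

theorem isBits_take (l : List Char) (n : Nat) (h : isBits l) : isBits (l.take n) :=
  fun c hc => h c (List.mem_of_mem_take hc)

theorem isBits_drop (l : List Char) (n : Nat) (h : isBits l) : isBits (l.drop n) :=
  fun c hc => h c (List.mem_of_mem_drop hc)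

theorem main_lemma (ks : List Char) (xs : List Char) (hx : isBits xs)
    (hlen : xs.length ≤ 8 * ks.length) (hk : ∀ c ∈ ks, c.toNat < 256) :
    chunksA (List.zipWith xchar xs (ks.flatMap (fun c => getBinaryFromNumber (getAsciiFromLetter c)))) =
      altLoop xs ks := by
  induction ks generalizing xs with
  | nil =>
    have hl0 : xs.length ≤ 0 := by simpa using hlen
    have hx0 : xs = [] := List.eq_nil_of_length_eq_zero (by omega)
    subst hx0
    simp [chunksA_nil, altLoop_nil]
  | cons c ks' ih =>
    by_cases hxe : xs = []
    · subst hxe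
      simp [chunksA_nil, altLoop_nil]
    · obtain ⟨h8len, h8bits, h8val⟩ := bin8_spec c (hk c (by simp))
      have hxlen0 : xs.length ≠ 0 := fun h => hxe (List.eq_nil_of_length_eq_zero h)
      rw [List.flatMap_cons, zipWith_split, h8len]
      have hr : (xs.take 8).length = min xs.length 8 := by simp; omega
      have hc1len : (List.zipWith xchar (xs.take 8) (getBinaryFromNumber (getAsciiFromLetter c))).length
          = min xs.length 8 := by simp [h8len]; omega
      have hne2 : (List.zipWith xchar (xs.take 8) (getBinaryFromNumber (getAsciiFromLetter c)) ++
          List.zipWith xchar (xs.drop 8)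
            (ks'.flatMap (fun c => getBinaryFromNumber (getAsciiFromLetter c)))) ≠ [] := by
        intro h
        have h2 := congrArg List.length h
        rw [List.length_append, hc1len, List.length_nil] at h2
        omega
      rw [chunksA_cons _ hne2, altLoop_cons xs _ hxe]
      simp only [List.headD_cons, List.tail_cons]
      have htake : (List.zipWith xchar (xs.take 8) (getBinaryFromNumber (getAsciiFromLetter c)) ++
          List.zipWith xchar (xs.drop 8)
            (ks'.flatMap (fun c => getBinaryFromNumber (getAsciiFromLetter c)))).take 8 =
          List.zipWith xchar (xs.take 8) (getBinaryFromNumber (getAsciiFromLetter c)) := by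
        by_cases h8 : 8 ≤ xs.length
        · rw [List.take_left' (by omega)]
        · have hd : xs.drop 8 = [] := List.drop_eq_nil_of_le (by omega)
          rw [hd]
          simp only [List.zipWith_nil_left, List.append_nil]
          exact List.take_of_length_le (by omega)
      have hdrop : (List.zipWith xchar (xs.take 8) (getBinaryFromNumber (getAsciiFromLetter c)) ++
          List.zipWith xchar (xs.drop 8)
            (ks'.flatMap (fun c => getBinaryFromNumber (getAsciiFromLetter c)))).drop 8 =
          List.zipWith xchar (xs.drop 8)
            (ks'.flatMap (fun c => getBinaryFromNumber (getAsciiFromLetter c))) := by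
        by_cases h8 : 8 ≤ xs.length
        · rw [List.drop_left' (by omega)]
        · have hd : xs.drop 8 = [] := List.drop_eq_nil_of_le (by omega)
          rw [hd]
          simp only [List.zipWith_nil_left, List.append_nil]
          exact List.drop_eq_nil_of_le (by omega)
      rw [htake, hdrop]
      congr 1
      · -- heads agree
        have hrle : min xs.length 8 ≤ 8 := by omega
        have htrunc : List.zipWith xchar (xs.take 8) (getBinaryFromNumber (getAsciiFromLetter c)) =
            List.zipWith xchar (xs.take 8)
              ((getBinaryFromNumber (getAsciiFromLetter c)).take (min xs.length 8)) := by
          conv_lhs => rw [show getBinaryFromNumber (getAsciiFromLetter c) =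
            (getBinaryFromNumber (getAsciiFromLetter c)).take (min xs.length 8) ++
            (getBinaryFromNumber (getAsciiFromLetter c)).drop (min xs.length 8) from
            (List.take_append_drop _ _).symm]
          rw [zipWith_split]
          have hbt : ((getBinaryFromNumber (getAsciiFromLetter c)).take (min xs.length 8)).length =
              min xs.length 8 := by rw [List.length_take, h8len]; omega
          rw [hbt, List.take_of_length_le (by simp), List.drop_eq_nil_of_le (by simp)]
          simp
        have hbitsTake : isBits (xs.take 8) := isBits_take _ _ hx
        have hbitsBt : isBits ((getBinaryFromNumber (getAsciiFromLetter c)).take (min xs.length 8)) :=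
          isBits_take _ _ h8bits
        rw [htrunc]
        congr 1
        have hbtlen : ((getBinaryFromNumber (getAsciiFromLetter c)).take (min xs.length 8)).length =
            min xs.length 8 := by rw [List.length_take, h8len]; omega
        rw [parseBin2_eq_bitv _ (isBits_zipWith_xchar _ _), Int.toNat_natCast,
            parseBin2_eq_bitv _ hbitsTake, Int.toNat_natCast,
            bitv_zipWith_xchar _ _ hbitsTake hbitsBt (by rw [hbtlen, hr]),
            bitv_take _ _ h8bits (by rw [h8len]; omega), h8val, h8len, hr]
      · exact ih (xs.drop 8) (isBits_drop _ _ hx) (by simp; simp at hlen; omega)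
          (fun d hd => hk d (by simp [hd]))

theorem checkBitLenght_def (x k : List Char) :
    checkBitLenght x k =
      if k.length < x.length / 8 then
        (List.replicate ((x.length / 8) / k.length) k).flatten ++
          List.take ((x.length / 8) % k.length) k
      else k := rfl

theorem checkBitLenght_mem (x k : List Char) (c : Char) (h : c ∈ checkBitLenght x k) : c ∈ k := by
  rw [checkBitLenght_def] at h
  split at h
  · rcases List.mem_append.mp h with h1 | h1
    · rcases List.mem_flatten.mp h1 with ⟨l, hl, hc⟩
      rw [List.eq_of_mem_replicate hl] at hc
      exact hc
    · exact List.mem_of_mem_take h1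
  · exact h

theorem checkBitLenght_length (x k : List Char)
    (h : x.length ≤ 8 * k.length ∨ (k ≠ [] ∧ x.length % 8 = 0)) :
    x.length ≤ 8 * (checkBitLenght x k).length := by
  rw [checkBitLenght_def]
  split
  case isTrue hlt =>
    have hk0 : k.length ≠ 0 := by
      rcases h with h1 | h1
      · intro h0; omega
      · intro h0; exact h1.1 (List.eq_nil_of_length_eq_zero h0)
    have hx8 : x.length % 8 = 0 := by
      rcases h with h1 | h1
      · omega
      · exact h1.2
    have hflat : ((List.replicate (x.length / 8 / k.length) k).flatten).length =
        (x.length / 8 / k.length) * k.length := by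
      rw [List.length_flatten, List.map_replicate, List.sum_replicate, smul_eq_mul]
    rw [List.length_append, hflat, List.length_take]
    have hmodlt : x.length / 8 % k.length < k.length := Nat.mod_lt _ (by omega)
    have : x.length / 8 / k.length * k.length + x.length / 8 % k.length = x.length / 8 := by
      rw [mul_comm]; exact Nat.div_add_mod _ _
    omega
  case isFalse hge =>
    rcases h with h1 | h1
    · exact h1
    · omega

-- ===== VERDICT (by name: the statement is the Claim_ definition above) =====
theorem length_flatMap_bin8 (ext : List Char) (h : ∀ c ∈ ext, c.toNat < 256) :
    (ext.flatMap (fun c => getBinaryFromNumber (getAsciiFromLetter c))).length = 8 * ext.length := by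
  induction ext with
  | nil => simp
  | cons c t ih =>
    rw [List.flatMap_cons, List.length_append, (bin8_spec c (h c (by simp))).1,
        ih (fun d hd => h d (by simp [hd]))]
    simp; ring

theorem isBits_flatMap_bin8 (ext : List Char) (h : ∀ c ∈ ext, c.toNat < 256) :
    isBits (ext.flatMap (fun c => getBinaryFromNumber (getAsciiFromLetter c))) := by
  intro d hd
  rcases List.mem_flatMap.mp hd with ⟨c, hc, hdc⟩
  exact (bin8_spec c (h c hc)).2.1 d hdc

theorem xOrToAscii_spec : Claim_equal_xOrToAscii := by
  intro x key hdom hpre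
  unfold Spec_xOrToAscii
  unfold Pre_xOrToAscii at hpre
  rw [Bool.and_eq_true] at hpre
  obtain ⟨hb1, hb2⟩ := hpre
  have hbitsx : isBits x.toList := by
    intro c hc
    have := List.all_eq_true.mp hb1 c hc
    simpa using this
  have hdisj : x.toList.length ≤ 8 * key.toList.length ∨
      (key.toList ≠ [] ∧ x.toList.length % 8 = 0) := by
    rw [Bool.or_eq_true] at hb2
    rcases hb2 with h | h
    · exact Or.inl (Nat.le_of_ble_eq_true h)
    · rw [Bool.and_eq_true] at h
      refine Or.inr ⟨?_, Nat.eq_of_beq_eq_true h.2⟩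
      simpa using h.1
  have hA : xOrToAscii x key = String.mk (binaryToAscii (xOrL x.toList
      (List.foldl (fun acc letter => acc ++ getBinaryFromNumber (getAsciiFromLetter letter)) []
        (checkBitLenght x.toList key.toList)))) := rfl
  have hB : xOrToAscii_alt x key =
      String.mk (rstripNul (altLoop x.toList (checkBitLenght x.toList key.toList))) := rfl
  rw [hA, hB]
  have hbits : isBits x.toList := hbitsx
  have hext := checkBitLenght_length x.toList key.toList hdisj
  have hk256 : ∀ c ∈ checkBitLenght x.toList key.toList, c.toNat < 256 := by
    intro c hc
    have hmem := checkBitLenght_mem _ _ _ hc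
    have hd : pvDomStr key = true := by
      unfold Dom_xOrToAscii at hdom
      exact (Bool.and_eq_true _ _ |>.mp hdom).2
    have := List.all_eq_true.mp hd c hmem
    simp [pvDomChar] at this
    omega
  rw [PySem.List.foldl_append_eq_flatMap, List.nil_append]
  set ext := checkBitLenght x.toList key.toList with hextdef
  set bk := ext.flatMap (fun c => getBinaryFromNumber (getAsciiFromLetter c)) with hbk
  have hbklen : bk.length = 8 * ext.length := length_flatMap_bin8 ext hk256
  have hbkbits : isBits bk := isBits_flatMap_bin8 ext hk256
  rw [xOrL_eq_zipWith x.toList bk hbits hbkbits (by omega)]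
  rw [binaryToAscii_eq_chunksA]
  rw [main_lemma ext x.toList hbits (by omega) hk256]
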